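-- pv_equiv track=rewrite | github.com/djsensei/soccer-tycoon | tools/card-forge/forge.py | stat_combos
-- ===== SOURCE A (Python) =====
-- STATS    = ['jumping', 'speed', 'strength', 'passing', 'shooting', 'reflexes', 'luck']
--
-- SLOT_EXCLUSIONS = {
--     'feet':   {'jumping'},
--     'body':   {'reflexes'},
--     'head':   {'speed'},
--     'gloves': {'shooting', 'speed', 'jumping'},
-- }
--
-- RARITY_BUDGET = {
--     'common':    1,
--     'uncommon':  2,
--     'rare':      4,
--     'epic':      6,
--     'legendary': 8,
-- }
--
-- def valid_stats(slot):
--     excluded = SLOT_EXCLUSIONS.get(slot, set())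
--     return [s for s in STATS if s not in excluded]
--
-- def stat_combos(slot, rarity):
--     """All valid stat distributions for slot+rarity, sorted for stability."""
--     budget = RARITY_BUDGET[rarity]
--     stats  = valid_stats(slot)
--     combos = []
--
--     def add(*pairs):
--         combos.append(dict(sorted(pairs)))
--
--     if rarity == 'common':
--         for s in stats:
--             add((s, 1))
--
--     elif rarity == 'uncommon':
--         for s in stats:
--             add((s, 2))
--         for i, s1 in enumerate(stats):
--             for s2 in stats[i+1:]:
--                 add((s1, 1), (s2, 1))
--
--     elif rarity == 'rare':
--         for s in stats:
--             add((s, 4))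
--         for i, s1 in enumerate(stats):
--             for s2 in stats[i+1:]:
--                 add((s1, 3), (s2, 1))
--                 add((s1, 2), (s2, 2))
--
--     elif rarity == 'epic':
--         for s in stats:
--             add((s, 6))
--         for i, s1 in enumerate(stats):
--             for s2 in stats[i+1:]:
--                 add((s1, 4), (s2, 2))
--                 add((s1, 3), (s2, 3))
--
--     elif rarity == 'legendary':
--         for s in stats:
--             add((s, 8))
--         for i, s1 in enumerate(stats):
--             for s2 in stats[i+1:]:
--                 add((s1, 5), (s2, 3))
--                 add((s1, 4), (s2, 4))
--
--     return combos
-- ===== SOURCE B (Python) =====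
-- STATS    = ['jumping', 'speed', 'strength', 'passing', 'shooting', 'reflexes', 'luck']
--
-- SLOT_EXCLUSIONS = {
--     'feet':   {'jumping'},
--     'body':   {'reflexes'},
--     'head':   {'speed'},
--     'gloves': {'shooting', 'speed', 'jumping'},
-- }
--
-- RARITY_BUDGET = {
--     'common':    1,
--     'uncommon':  2,
--     'rare':      4,
--     'epic':      6,
--     'legendary': 8,
-- }
--
-- def valid_stats(slot):
--     excluded = SLOT_EXCLUSIONS.get(slot, set())
--     return [s for s in STATS if s not in excluded]
--
-- def stat_combos(slot, rarity):
--     """All valid stat distributions for slot+rarity, sorted for stability."""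
--     budget = RARITY_BUDGET[rarity]
--     stats  = valid_stats(slot)
--     # The admissible two-stat splits are exactly the divisions of the budget
--     # into two positive parts differing by at most 2, most skewed first.
--     splits = [(budget - b, b) for b in range(1, budget // 2 + 1) if budget - 2 * b <= 2]
--
--     def pair_combos(rest):
--         if not rest:
--             return []
--         s1, others = rest[0], rest[1:]
--         here = []
--         for s2 in others:
--             for a, b in splits:
--                 here.append(dict(sorted([(s1, a), (s2, b)])))
--         return here + pair_combos(others)
--
--     return [{s: budget} for s in stats] + pair_combos(stats)
-- ===== Notes on version B (the rewrite author's own statement) =====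
-- stated objective: simpler
-- what changed: B deletes the five per-rarity branch bodies entirely: the admissible pair splits are computed arithmetically from the budget (two positive parts differing by at most 2, most skewed first), and the i<j pair enumeration is a recursion on the stat list instead of enumerate plus slicing.
import Mathlib
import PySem

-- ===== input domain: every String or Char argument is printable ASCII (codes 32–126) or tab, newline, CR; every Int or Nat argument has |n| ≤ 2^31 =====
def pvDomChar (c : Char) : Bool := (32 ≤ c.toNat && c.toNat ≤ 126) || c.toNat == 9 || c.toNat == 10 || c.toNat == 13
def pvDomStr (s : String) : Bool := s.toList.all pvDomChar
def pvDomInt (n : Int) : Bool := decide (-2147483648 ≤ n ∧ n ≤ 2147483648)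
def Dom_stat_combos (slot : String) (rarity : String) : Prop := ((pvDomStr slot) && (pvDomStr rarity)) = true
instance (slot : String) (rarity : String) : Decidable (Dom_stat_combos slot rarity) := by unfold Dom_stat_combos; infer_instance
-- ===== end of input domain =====

-- B removes all five per-rarity branches: pair splits are derived arithmetically from the budget
-- and pairs are generated by recursion on the stat list (objective: simpler).

-- shared module-level constants (same module in both Pythons)
def STATS : List String := ["jumping", "speed", "strength", "passing", "shooting", "reflexes", "luck"]

def SLOT_EXCLUSIONS : PySem.Dict String (PySem.Set String) :=
  PySem.Dict.ofList
    [("feet", PySem.Set.ofList ["jumping"]),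
     ("body", PySem.Set.ofList ["reflexes"]),
     ("head", PySem.Set.ofList ["speed"]),
     ("gloves", PySem.Set.ofList ["shooting", "speed", "jumping"])]

def RARITY_BUDGET : PySem.Dict String Int :=
  PySem.Dict.ofList
    [("common", 1), ("uncommon", 2), ("rare", 4), ("epic", 6), ("legendary", 8)]

def valid_stats (slot : String) : List String :=
  let excluded := SLOT_EXCLUSIONS.getD slot PySem.Set.empty
  STATS.filter (fun s => !(PySem.Set.contains excluded s))

-- dict(sorted([(s1, a), (s2, b)])); hand-ported: Python sorts the two (str, int) tuples
-- lexicographically (String.lt agrees with Python on the ASCII domain) and dict collapses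
-- equal keys keeping the later value — exact for two pairs
def dictSorted2 (s1 : String) (a : Int) (s2 : String) (b : Int) : List (String × Int) :=
  if s1 < s2 then [(s1, a), (s2, b)]
  else if s2 < s1 then [(s2, b), (s1, a)]
  else if a ≤ b then [(s1, b)] else [(s1, a)]

-- ===== PORT A =====
-- dict(sorted([(s, v)])) = {s: v}; hand-ported, exact for a single pair
def addOne (s : String) (v : Int) : List (String × Int) := [(s, v)]

-- A's 'for i, s1 in enumerate(stats): for s2 in stats[i+1:]' as the obvious structural recursion,
-- one recursive helper per rarity branch, mirroring the inlined add(...) calls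
def pairsUncommonA : List String → List (List (String × Int))
  | [] => []
  | s1 :: rest => rest.map (fun s2 => dictSorted2 s1 1 s2 1) ++ pairsUncommonA rest

def pairsRareA : List String → List (List (String × Int))
  | [] => []
  | s1 :: rest => rest.flatMap (fun s2 => [dictSorted2 s1 3 s2 1, dictSorted2 s1 2 s2 2]) ++ pairsRareA rest

def pairsEpicA : List String → List (List (String × Int))
  | [] => []
  | s1 :: rest => rest.flatMap (fun s2 => [dictSorted2 s1 4 s2 2, dictSorted2 s1 3 s2 3]) ++ pairsEpicA rest

def pairsLegendaryA : List String → List (List (String × Int))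
  | [] => []
  | s1 :: rest => rest.flatMap (fun s2 => [dictSorted2 s1 5 s2 3, dictSorted2 s1 4 s2 4]) ++ pairsLegendaryA rest

def stat_combos (slot : String) (rarity : String) : List (List (String × Int)) :=
  match RARITY_BUDGET.get? rarity with
  | none => []  -- KeyError in Python; excluded by Pre_stat_combos
  | some _budget =>
    let stats := valid_stats slot
    if rarity = "common" then stats.map (fun s => addOne s 1)
    else if rarity = "uncommon" then stats.map (fun s => addOne s 2) ++ pairsUncommonA stats
    else if rarity = "rare" then stats.map (fun s => addOne s 4) ++ pairsRareA stats
    else if rarity = "epic" then stats.map (fun s => addOne s 6) ++ pairsEpicA stats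
    else if rarity = "legendary" then stats.map (fun s => addOne s 8) ++ pairsLegendaryA stats
    else []  -- unreachable: every RARITY_BUDGET key is matched; Python returns combos = []

-- ===== PORT B =====
-- [(budget - b, b) for b in range(1, budget // 2 + 1) if budget - 2*b <= 2]
def splitsB (budget : Int) : List (Int × Int) :=
  ((PySem.List.pyRange 1 (PySem.Int.floordiv budget 2 + 1) 1).filter
      (fun b => budget - 2 * b ≤ 2)).map (fun b => (budget - b, b))

-- B's recursive pair_combos: head of the list paired with every later stat (all splits), then recurse
def pairCombosB (splits : List (Int × Int)) : List String → List (List (String × Int))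
  | [] => []
  | s1 :: others =>
      others.flatMap (fun s2 => splits.map (fun ab => dictSorted2 s1 ab.1 s2 ab.2))
        ++ pairCombosB splits others

def stat_combos_alt (slot : String) (rarity : String) : List (List (String × Int)) :=
  match RARITY_BUDGET.get? rarity with
  | none => []  -- KeyError in Python; excluded by Pre_stat_combos
  | some budget =>
    let stats := valid_stats slot
    let splits := splitsB budget
    stats.map (fun s => [(s, budget)]) ++ pairCombosB splits stats

-- ===== PRECONDITION & SPEC =====
-- Pre_ excludes rarities outside RARITY_BUDGET, on which A raises KeyError.
def Pre_stat_combos (slot : String) (rarity : String) : Prop :=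
  rarity = "common" ∨ rarity = "uncommon" ∨ rarity = "rare" ∨ rarity = "epic" ∨ rarity = "legendary"
instance (slot : String) (rarity : String) : Decidable (Pre_stat_combos slot rarity) := by
  unfold Pre_stat_combos; infer_instance

def pvWitness_stat_combos : String × String := ("feet", "rare")

def Spec_stat_combos (slot : String) (rarity : String) (out : List (List (String × Int))) : Prop := out = stat_combos_alt slot rarity
instance (slot : String) (rarity : String) (out : List (List (String × Int))) : Decidable (Spec_stat_combos slot rarity out) := by unfold Spec_stat_combos; infer_instance

-- ===== CLAIM (what is proved, stated in full; the proofs are below) =====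
def Claim_equal_stat_combos : Prop := ∀ (slot : String) (rarity : String), Dom_stat_combos slot rarity → Pre_stat_combos slot rarity → Spec_stat_combos slot rarity (stat_combos slot rarity)

-- ===== LEMMAS AND PROOFS =====

lemma splitsB_one : splitsB 1 = [] := by decide
lemma splitsB_two : splitsB 2 = [(1, 1)] := by decide
lemma splitsB_four : splitsB 4 = [(3, 1), (2, 2)] := by decide
lemma splitsB_six : splitsB 6 = [(4, 2), (3, 3)] := by decide
lemma splitsB_eight : splitsB 8 = [(5, 3), (4, 4)] := by decide

lemma pairCombosB_nil (ss : List String) : pairCombosB [] ss = [] := by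
  induction ss with
  | nil => rfl
  | cons s rest ih => simp [pairCombosB, ih]

lemma pairsUncommonA_eq (ss : List String) : pairsUncommonA ss = pairCombosB [(1, 1)] ss := by
  induction ss with
  | nil => rfl
  | cons s rest ih => simp [pairsUncommonA, pairCombosB, ih, ← List.map_eq_flatMap]

lemma pairsRareA_eq (ss : List String) : pairsRareA ss = pairCombosB [(3, 1), (2, 2)] ss := by
  induction ss with
  | nil => rfl
  | cons s rest ih => simp [pairsRareA, pairCombosB, ih]

lemma pairsEpicA_eq (ss : List String) : pairsEpicA ss = pairCombosB [(4, 2), (3, 3)] ss := by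
  induction ss with
  | nil => rfl
  | cons s rest ih => simp [pairsEpicA, pairCombosB, ih]

lemma pairsLegendaryA_eq (ss : List String) : pairsLegendaryA ss = pairCombosB [(5, 3), (4, 4)] ss := by
  induction ss with
  | nil => rfl
  | cons s rest ih => simp [pairsLegendaryA, pairCombosB, ih]

lemma budget_common : RARITY_BUDGET.get? "common" = some 1 := by decide
lemma budget_uncommon : RARITY_BUDGET.get? "uncommon" = some 2 := by decide
lemma budget_rare : RARITY_BUDGET.get? "rare" = some 4 := by decide
lemma budget_epic : RARITY_BUDGET.get? "epic" = some 6 := by decide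
lemma budget_legendary : RARITY_BUDGET.get? "legendary" = some 8 := by decide

-- ===== VERDICT (by name: the statement is the Claim_ definition above) =====
theorem stat_combos_spec : Claim_equal_stat_combos := by
  intro slot rarity _ hpre
  unfold Spec_stat_combos
  rcases hpre with h | h | h | h | h <;> subst h <;>
    simp [stat_combos, stat_combos_alt, addOne,
          budget_common, budget_uncommon, budget_rare, budget_epic, budget_legendary,
          splitsB_one, splitsB_two, splitsB_four, splitsB_six, splitsB_eight,
          pairCombosB_nil, pairsUncommonA_eq, pairsRareA_eq, pairsEpicA_eq, pairsLegendaryA_eq]
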